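-- pv_equiv track=rewrite | github.com/sundar91/dsa | Modulo/mod-string.py | findMod
-- ===== SOURCE A (Python) =====
-- def findMod(A, B):
--     pw = 1
--     n = len(A)
--     s = 0
--     for i in range(n-1, -1, -1):
--         val = int(A[i])
--         s += ((val % B) * (pw % B)) % B
--         pw = (pw * 10) % B
--     return s % B
-- ===== SOURCE B (Python) =====
-- def findMod(A, B):
--     # Horner's method: single running remainder, left-to-right scan.
--     r = 0
--     for c in A:
--         r = (r * 10 + int(c)) % B
--     return r
-- ===== Notes on version B (the rewrite author's own statement) =====
-- stated objective: simpler
-- what changed: Replaces A's right-to-left scan that maintains a separate power-of-10 accumulator and sums reduced digit*power terms with Horner's method: a single running remainder updated left to right as r = (r*10 + int(c)) % B.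
import Mathlib
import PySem

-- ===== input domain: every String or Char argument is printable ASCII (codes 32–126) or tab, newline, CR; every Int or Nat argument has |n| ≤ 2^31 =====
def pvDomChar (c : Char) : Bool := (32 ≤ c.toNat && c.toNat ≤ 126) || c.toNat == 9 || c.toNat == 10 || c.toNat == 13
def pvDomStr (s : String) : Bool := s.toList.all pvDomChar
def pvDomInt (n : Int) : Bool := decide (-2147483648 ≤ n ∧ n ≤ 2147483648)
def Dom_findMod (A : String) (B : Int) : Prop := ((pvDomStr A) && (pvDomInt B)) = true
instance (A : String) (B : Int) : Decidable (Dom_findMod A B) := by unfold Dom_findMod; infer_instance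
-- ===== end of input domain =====

-- B replaces A's right-to-left scan with tracked powers of 10 by Horner's method: one running remainder, left to right (simpler; same O(n) cost).

-- ===== PORT A =====
-- literal port of A: state (pw, s); s accumulates ((int(A[i]) % B) * (pw % B)) % B over i = n-1 .. 0
def findMod (A : String) (B : Int) : Int :=
  let n : Int := PySem.Str.len A
  let r :=
    (PySem.List.pyRange (n - 1) (-1) (-1)).foldl
      (fun (st : Int × Int) i =>
        let val : Int := ((PySem.Str.pyGet? A i).bind (fun c => PySem.Int.ofChars? [c])).getD 0
        (PySem.Int.mod (st.1 * 10) B,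
         st.2 + PySem.Int.mod (PySem.Int.mod val B * PySem.Int.mod st.1 B) B))
      (1, 0)
  PySem.Int.mod r.2 B

-- ===== PORT B =====
-- literal port of B: Horner's method, r = (r*10 + int(c)) % B over the characters left to right
def findMod_alt (A : String) (B : Int) : Int :=
  A.toList.foldl (fun r c => PySem.Int.mod (r * 10 + (PySem.Int.ofChars? [c]).getD 0) B) 0

-- ===== PRECONDITION & SPEC =====
-- Pre_ excludes exactly the inputs where A raises: B = 0 ('%' raises ZeroDivisionError) and
-- strings with a non-digit character (int(A[i]) raises ValueError).
def Pre_findMod (A : String) (B : Int) : Prop := B ≠ 0 ∧ A.toList.all Char.isDigit = true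
instance (A : String) (B : Int) : Decidable (Pre_findMod A B) := by unfold Pre_findMod; infer_instance

def pvWitness_findMod : String × Int := ("91263", 7)

def Spec_findMod (A : String) (B : Int) (out : Int) : Prop := out = findMod_alt A B
instance (A : String) (B : Int) (out : Int) : Decidable (Spec_findMod A B out) := by unfold Spec_findMod; infer_instance

-- ===== CLAIM (what is proved, stated in full; the proofs are below) =====
def Claim_equal_findMod : Prop := ∀ (A : String) (B : Int), Dom_findMod A B → Pre_findMod A B → Spec_findMod A B (findMod A B)

-- ===== LEMMAS AND PROOFS =====

-- decimal value of a digit string (proof-side abstraction)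
def numVal (l : List Char) : Int := l.foldl (fun a c => a * 10 + ((c.toNat : Int) - 48)) 0

theorem ofChars?_digit (c : Char) (h : c.isDigit = true) :
    PySem.Int.ofChars? [c] = some ((c.toNat : Int) - 48) := by
  simp [Char.isDigit] at h
  obtain ⟨h1, h2⟩ := h
  have h1' : (48 : Nat) ≤ c.toNat := h1
  have h2' : c.toNat ≤ 57 := h2
  have hc : c = Char.ofNat c.toNat := (Char.ofNat_toNat c).symm
  rcases (by omega : c.toNat = 48 ∨ c.toNat = 49 ∨ c.toNat = 50 ∨ c.toNat = 51 ∨ c.toNat = 52 ∨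
      c.toNat = 53 ∨ c.toNat = 54 ∨ c.toNat = 55 ∨ c.toNat = 56 ∨ c.toNat = 57) with
    h|h|h|h|h|h|h|h|h|h <;> rw [h] at hc <;> rw [hc] <;> decide

theorem fmod_modEq (x B : Int) : x.fmod B ≡ x [ZMOD B] :=
  Int.modEq_iff_dvd.mpr ⟨x.fdiv B, by linarith [Int.mul_fdiv_add_fmod x B]⟩

theorem fmod_eq_of_modEq {B x y : Int} (h : x ≡ y [ZMOD B]) : x.fmod B = y.fmod B := by
  obtain ⟨k, hk⟩ := Int.modEq_iff_dvd.mp h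
  have hy : y = x + B * k := by linarith
  rw [hy, Int.add_mul_fmod_self_left]

theorem A_fold (B : Int) (l : List Char) (hd : ∀ c ∈ l, c.isDigit = true) :
    ∀ pw s : Int,
    ((PySem.List.pyRange ((l.length : Int) - 1) (-1) (-1)).foldl
      (fun (st : Int × Int) i =>
        (PySem.Int.mod (st.1 * 10) B,
         st.2 + PySem.Int.mod (PySem.Int.mod
            (((PySem.List.pyGet? l i).bind (fun c => PySem.Int.ofChars? [c])).getD 0) B
            * PySem.Int.mod st.1 B) B))
      (pw, s)).2 ≡ s + pw * numVal l [ZMOD B] := by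
  induction l using List.reverseRecOn with
  | nil =>
    intro pw s
    simp [numVal]
  | append_singleton l' c ih =>
    intro pw s
    have hc : c.isDigit = true := hd c (by simp)
    have hd' : ∀ c ∈ l', c.isDigit = true := fun x hx => hd x (by simp [hx])
    have hlen : (((l' ++ [c]).length : Int) - 1) = (l'.length : Int) := by simp
    rw [hlen, PySem.List.pyRange_neg_one_cons (by omega : (-1 : Int) < (l'.length : Int)),
      List.foldl_cons]
    have hget : PySem.List.pyGet? (l' ++ [c]) (l'.length : Int) = some c :=
      PySem.List.pyGet?_append_length l' [] c
    rw [hget]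
    simp only [Option.bind_some, ofChars?_digit c hc, Option.getD_some]
    have hcongr :
        (PySem.List.pyRange ((l'.length : Int) - 1) (-1) (-1)).foldl
          (fun (st : Int × Int) i =>
            (PySem.Int.mod (st.1 * 10) B,
             st.2 + PySem.Int.mod (PySem.Int.mod
                (((PySem.List.pyGet? (l' ++ [c]) i).bind (fun c => PySem.Int.ofChars? [c])).getD 0) B
                * PySem.Int.mod st.1 B) B)) (PySem.Int.mod (pw * 10) B, s + PySem.Int.mod (PySem.Int.mod ((c.toNat : Int) - 48) B * PySem.Int.mod pw B) B)
        = (PySem.List.pyRange ((l'.length : Int) - 1) (-1) (-1)).foldl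
          (fun (st : Int × Int) i =>
            (PySem.Int.mod (st.1 * 10) B,
             st.2 + PySem.Int.mod (PySem.Int.mod
                (((PySem.List.pyGet? l' i).bind (fun c => PySem.Int.ofChars? [c])).getD 0) B
                * PySem.Int.mod st.1 B) B)) (PySem.Int.mod (pw * 10) B, s + PySem.Int.mod (PySem.Int.mod ((c.toNat : Int) - 48) B * PySem.Int.mod pw B) B) := by
      apply PySem.List.foldl_congr_mem
      intro acc i hi
      obtain ⟨hi1, hi2⟩ := PySem.List.mem_pyRange_neg_one.mp hi
      have h0 : (0 : Int) ≤ i := by omega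
      have hlt : i.toNat < l'.length := by omega
      rw [PySem.List.pyGet?_of_nonneg _ h0, PySem.List.pyGet?_of_nonneg _ h0,
        List.getElem?_append_left hlt]
    rw [hcongr]
    refine (ih hd' _ _).trans ?_
    have hnum : numVal (l' ++ [c]) = numVal l' * 10 + ((c.toNat : Int) - 48) := by
      simp [numVal, List.foldl_append]
    rw [hnum]
    have h1 : s + PySem.Int.mod (PySem.Int.mod ((c.toNat : Int) - 48) B * PySem.Int.mod pw B) B
        ≡ s + ((c.toNat : Int) - 48) * pw [ZMOD B] :=
      ((fmod_modEq _ _).trans ((fmod_modEq ((c.toNat : Int) - 48) B).mul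
        (fmod_modEq pw B))).add_left s
    have h2 : PySem.Int.mod (pw * 10) B * numVal l' ≡ (pw * 10) * numVal l' [ZMOD B] :=
      (fmod_modEq (pw * 10) B).mul_right _
    have h3 := h1.add h2
    have heq : s + ((c.toNat : Int) - 48) * pw + pw * 10 * numVal l'
        = s + pw * (numVal l' * 10 + ((c.toNat : Int) - 48)) := by ring
    rwa [heq] at h3

theorem B_fold (B : Int) (l : List Char) :
    ∀ r : Int,
    l.foldl (fun r c => PySem.Int.mod (r * 10 + ((c.toNat : Int) - 48)) B) (r.fmod B)
      = (l.foldl (fun a c => a * 10 + ((c.toNat : Int) - 48)) r).fmod B := by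
  induction l with
  | nil => intro r; rfl
  | cons c l ih =>
    intro r
    have hstep : (r.fmod B * 10 + ((c.toNat : Int) - 48)).fmod B
        = (r * 10 + ((c.toNat : Int) - 48)).fmod B :=
      fmod_eq_of_modEq (((fmod_modEq r B).mul_right 10).add_right _)
    simp only [List.foldl_cons, PySem.Int.mod]
    rw [hstep]
    exact ih (r * 10 + ((c.toNat : Int) - 48))

-- ===== VERDICT (by name: the statement is the Claim_ definition above) =====
theorem findMod_spec : Claim_equal_findMod := by
  intro A B _ hpre
  obtain ⟨hB, hdig⟩ := hpre
  have hd : ∀ c ∈ A.toList, c.isDigit = true := by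
    simpa [List.all_eq_true] using hdig
  unfold Spec_findMod findMod findMod_alt
  simp only [PySem.Str.len, PySem.Str.pyGet?, PySem.Chars.pyGet?]
  have hA := fmod_eq_of_modEq (A_fold B A.toList hd 1 0)
  simp only [PySem.Int.mod] at hA ⊢
  rw [hA]
  have hcongr :
      A.toList.foldl (fun r c => (r * 10 + (PySem.Int.ofChars? [c]).getD 0).fmod B) 0
        = A.toList.foldl (fun r c => (r * 10 + ((c.toNat : Int) - 48)).fmod B) 0 := by
    apply PySem.List.foldl_congr_mem
    intro acc c hc
    rw [ofChars?_digit c (hd c hc), Option.getD_some]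
  have hB0 := B_fold B A.toList 0
  rw [Int.zero_fmod] at hB0
  simp only [PySem.Int.mod] at hB0
  rw [hcongr, hB0]
  simp [numVal]
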